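-- pv_equiv track=rewrite | github.com/MoYuanMBS/2048 | play.py | moveable_and_Loose_checker
-- ===== SOURCE A (Python) =====
-- def moveable_and_Loose_checker(current_data_row) -> tuple[bool,bool]:
--     temp_number = 0
--     none_count = 0
--     combine_number = False
--     moveable = False
--     slot_full = False
--     for i in current_data_row:
--         if temp_number == i and i != None:
--             combine_number = True
--             break
--         elif i is None:
--             none_count += 1
--         else:
--             if none_count != 0:
--                 moveable = True
--         if i != None:
--             temp_number = i
--     if  combine_number is True:
--         moveable = True
--     else:
--         if none_count == 0:
--             slot_full = True
--     return moveable, slot_full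
-- ===== SOURCE B (Python) =====
-- def moveable_and_Loose_checker(current_data_row) -> tuple[bool, bool]:
--     values = [x for x in current_data_row if x is not None]
--     none_count = len(current_data_row) - len(values)
--     combine = False
--     prev = 0
--     for v in values:
--         if v == prev:
--             combine = True
--             break
--         prev = v
--     gap = False
--     seen_none = False
--     for x in current_data_row:
--         if x is None:
--             seen_none = True
--         elif seen_none:
--             gap = True
--             break
--     return (combine or gap, (not combine) and none_count == 0)
-- ===== Notes on version B (the rewrite author's own statement) =====
-- stated objective: simpler
-- what changed: A's single stateful loop with break and post-hoc fixups is replaced by three independent facts computed separately (combine on the None-filtered values with prev seeded to 0, a None-then-value gap scan, and a None count) combined in one return expression.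
import Mathlib
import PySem

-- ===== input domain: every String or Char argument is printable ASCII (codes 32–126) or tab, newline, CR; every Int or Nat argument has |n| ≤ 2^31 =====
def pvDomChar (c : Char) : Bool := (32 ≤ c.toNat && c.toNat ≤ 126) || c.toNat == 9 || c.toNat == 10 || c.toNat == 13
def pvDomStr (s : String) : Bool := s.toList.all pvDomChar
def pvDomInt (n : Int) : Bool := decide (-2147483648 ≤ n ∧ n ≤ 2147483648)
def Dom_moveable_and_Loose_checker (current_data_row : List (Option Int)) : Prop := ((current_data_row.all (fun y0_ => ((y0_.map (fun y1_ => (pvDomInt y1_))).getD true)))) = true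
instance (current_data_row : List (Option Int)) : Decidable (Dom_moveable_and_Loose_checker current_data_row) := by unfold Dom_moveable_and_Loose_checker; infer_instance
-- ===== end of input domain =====

-- B replaces A's single stateful break-loop with three independently computed facts
-- (combine over the None-filtered values, a None-then-value gap scan, a None count); objective: simpler.


-- ===== PORT A =====
-- state: (temp_number, none_count, moveable); returns (none_count, combine_number, moveable)
-- break is modelled by returning immediately with combine_number = true
def pvLoopA : List (Option Int) → Int → Int → Bool → Int × Bool × Bool
  | [], _, nc, mov => (nc, false, mov)
  | i :: rest, temp, nc, mov =>
    match i with
    | some v =>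
      if temp == v then (nc, true, mov)
      else pvLoopA rest v nc (if nc != 0 then true else mov)
    | none => pvLoopA rest temp (nc + 1) mov

def moveable_and_Loose_checker (current_data_row : List (Option Int)) : Bool × Bool :=
  let (nc, comb, mov) := pvLoopA current_data_row 0 0 false
  if comb then (true, false) else (mov, nc == 0)

-- ===== PORT B =====
def pvCombine : List Int → Int → Bool
  | [], _ => false
  | v :: rest, prev => if v == prev then true else pvCombine rest v

def pvGap : List (Option Int) → Bool → Bool
  | [], _ => false
  | none :: rest, _ => pvGap rest true
  | some _ :: rest, seen => if seen then true else pvGap rest seen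

def moveable_and_Loose_checker_alt (current_data_row : List (Option Int)) : Bool × Bool :=
  let values := current_data_row.filterMap id
  let none_count : Int := (current_data_row.length : Int) - (values.length : Int)
  let combine := pvCombine values 0
  let gap := pvGap current_data_row false
  ((combine || gap), (!combine) && (none_count == 0))

-- ===== PRECONDITION & SPEC =====
def Spec_moveable_and_Loose_checker (current_data_row : List (Option Int)) (out : Bool × Bool) : Prop := out = moveable_and_Loose_checker_alt current_data_row
instance (current_data_row : List (Option Int)) (out : Bool × Bool) : Decidable (Spec_moveable_and_Loose_checker current_data_row out) := by unfold Spec_moveable_and_Loose_checker; infer_instance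

-- ===== CLAIM (what is proved, stated in full; the proofs are below) =====
def Claim_equal_moveable_and_Loose_checker : Prop := ∀ (current_data_row : List (Option Int)), Dom_moveable_and_Loose_checker current_data_row → Spec_moveable_and_Loose_checker current_data_row (moveable_and_Loose_checker current_data_row)

-- ===== LEMMAS AND PROOFS =====

-- number of Nones in the row
def pvNoneCount : List (Option Int) → Int
  | [] => 0
  | none :: rest => pvNoneCount rest + 1
  | some _ :: rest => pvNoneCount rest

lemma pvNoneCount_eq (row : List (Option Int)) :
    pvNoneCount row = (row.length : Int) - ((row.filterMap id).length : Int) := by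
  induction row with
  | nil => simp [pvNoneCount]
  | cons h t ih =>
    cases h
    · simp [pvNoneCount, ih]; ring
    · simp [pvNoneCount, ih]

-- the whole-program invariant: A's finished loop state, post-processed, equals B's three facts
lemma pvKey (row : List (Option Int)) : ∀ (prev nc : Int) (mov : Bool), 0 ≤ nc →
    (let (nc', comb, mov') := pvLoopA row prev nc mov
     if comb then (true, false) else (mov', nc' == 0)) =
    ((pvCombine (row.filterMap id) prev || (mov || pvGap row (nc != 0))),
     (!pvCombine (row.filterMap id) prev) && ((nc + pvNoneCount row) == 0)) := by
  induction row with
  | nil =>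
    intro prev nc mov _
    simp [pvLoopA, pvCombine, pvGap, pvNoneCount]
  | cons h t ih =>
    intro prev nc mov hnc
    cases h with
    | none =>
      have h1 : ((nc + 1) != 0) = true := by simp; omega
      simpa [pvLoopA, pvGap, pvNoneCount, List.filterMap_cons, h1,
             add_assoc, add_comm, add_left_comm] using ih prev (nc + 1) mov (by omega)
    | some v =>
      by_cases hv : prev == v
      · have hv' : (v == prev) = true := by simp at hv ⊢; omega
        simp [pvLoopA, hv, pvCombine, hv']
      · have hv' : (v == prev) = false := by simp at hv ⊢; omega
        by_cases h0 : nc = 0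
        · subst h0
          simpa [pvLoopA, hv, pvCombine, hv', pvGap, pvNoneCount, List.filterMap_cons]
            using ih v 0 mov le_rfl
        · have h1 : (nc != 0) = true := by simp; omega
          have := ih v nc true hnc
          simp [pvLoopA, hv, pvCombine, hv', pvGap, pvNoneCount, h1] at this ⊢
          simpa using this

-- ===== VERDICT (by name: the statement is the Claim_ definition above) =====
theorem moveable_and_Loose_checker_spec : Claim_equal_moveable_and_Loose_checker := by
  intro row _
  unfold Spec_moveable_and_Loose_checker moveable_and_Loose_checker moveable_and_Loose_checker_alt
  have key := pvKey row 0 0 false le_rfl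
  have hnc := pvNoneCount_eq row
  rcases hs : pvLoopA row 0 0 false with ⟨nc, comb, mov⟩
  simp only [hs] at key
  simp [key, hnc]
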